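-- pv_equiv track=rewrite | github.com/alexandershov/competitive_programming | src/competitive_programming/chapter_4.py | _solve_sorted_machines_problem
-- ===== SOURCE A (Python) =====
-- def _solve_sorted_machines_problem(machines: list[int], k: int, end: int) -> int:
--     assert end > 0
--
--     assert k > 0
--     if end == 1:
--         return machines[0] * k
--     best = None
--     for slowest_k in range(0, k):
--         solution = _solve_sorted_machines_problem(machines, k - slowest_k, end - 1)
--         if best is None:
--             best = solution
--         else:
--             best = min(best, max(solution, machines[end - 1] * slowest_k))
--     return best
-- ===== SOURCE B (Python) =====
-- def _best(dp: list[int], m: int, kk: int) -> int: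
--     best = dp[kk]
--     for s in range(1, kk):
--         v = dp[kk - s]
--         c = m * s
--         cand = v if v >= c else c
--         if cand < best:
--             best = cand
--     return best
--
--
-- def _solve_sorted_machines_problem(machines: list[int], k: int, end: int) -> int:
--     assert end > 0
--     assert k > 0
--     if end == 1:
--         return machines[0] * k
--     # bottom-up DP: dp[kk] = answer for budget kk at the current level
--     dp = [machines[0] * kk for kk in range(k + 1)]
--     for e in range(2, end):
--         m = machines[e - 1]
--         dp = [0] + [_best(dp, m, kk) for kk in range(1, k + 1)]
--     # at the final level only the budget-k entry is needed
--     return _best(dp, machines[end - 1], k)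
-- ===== Notes on version B (the rewrite author's own statement) =====
-- stated objective: alternative
-- what changed: Replaced A's branching recursion over (k, end) with a bottom-up dynamic-programming table of rows indexed by the machine budget; Pre_ excludes end > len(machines), where A raises IndexError except in the accidental k = 1 case whose else branch is unreached, while B's DP always indexes machines[end-1] and raises.
-- outside the precondition, e.g. on _solve_sorted_machines_problem([9, 0, 0], 1, 5): A returns 9, B raises IndexError
import Mathlib
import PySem

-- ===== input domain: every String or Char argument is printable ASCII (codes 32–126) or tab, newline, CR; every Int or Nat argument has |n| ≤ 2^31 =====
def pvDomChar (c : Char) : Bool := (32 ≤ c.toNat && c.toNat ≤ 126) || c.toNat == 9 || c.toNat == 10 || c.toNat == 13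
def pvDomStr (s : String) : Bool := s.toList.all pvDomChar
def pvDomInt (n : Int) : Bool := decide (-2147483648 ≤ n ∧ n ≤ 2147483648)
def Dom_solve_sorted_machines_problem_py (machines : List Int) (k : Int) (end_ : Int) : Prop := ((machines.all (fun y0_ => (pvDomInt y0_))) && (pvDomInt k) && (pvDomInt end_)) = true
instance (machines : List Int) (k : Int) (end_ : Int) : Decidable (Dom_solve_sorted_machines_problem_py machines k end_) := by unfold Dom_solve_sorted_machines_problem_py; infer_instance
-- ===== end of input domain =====

-- B replaces A's branching recursion by a bottom-up DP over rows indexed by the machine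
-- budget (objective: alternative algorithm). Neither program mutates its arguments.

-- ===== PORT A =====
-- literal transliteration of A's recursion; the Int argument `end` is recursed on via its toNat
-- (A asserts end > 0 / k > 0 and raises outside that, which Pre_ excludes; the 0-fuel /
-- best-is-None / out-of-range-index cases return defaults only outside Pre_).
def pvAgo (m : List Int) : Int → Nat → Int
  | _, 0 => 0
  | k, 1 => ((PySem.List.pyGet? m 0).getD 0) * k
  | k, (e+2) =>
      ((PySem.List.pyRange 0 k 1).foldl
        (fun (best : Option Int) s =>
          let sol := pvAgo m (k - s) (e+1)
          match best with
          | none => some sol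
          | some b => some (min b (max sol (((PySem.List.pyGet? m ((e : Int) + 1)).getD 0) * s))))
        none).getD 0

def solve_sorted_machines_problem_py (machines : List Int) (k : Int) (end_ : Int) : Int :=
  pvAgo machines k end_.toNat

-- ===== PORT B =====
-- transliteration of Source B: dp row for end = 1
def pvRow1 (m : List Int) (kN : Nat) : List Int :=
  (List.range (kN+1)).map (fun (kk : Nat) => ((PySem.List.pyGet? m 0).getD 0) * (kk : Int))

-- Source B's _best: `for s in range(1, kk)` with s = i+1
def pvInner (dp : List Int) (mv : Int) (kk : Nat) : Int :=
  (List.range (kk-1)).foldl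
    (fun best i =>
      let v := dp.getD (kk - (i+1)) 0
      let c := mv * ((i : Int) + 1)
      let cand := if v ≥ c then v else c
      if cand < best then cand else best)
    (dp.getD kk 0)

-- one level `e` of Source B's outer loop ([0] + the mapped budgets 1..k)
def pvStep (m : List Int) (kN : Nat) (e : Nat) (dp : List Int) : List Int :=
  (List.range (kN+1)).map (fun kk =>
    if kk = 0 then 0 else pvInner dp ((PySem.List.pyGet? m ((e : Int) - 1)).getD 0) kk)

-- dp after the first n outer-loop levels (pvDP n is the row for end-level n+1)
def pvDP (m : List Int) (kN : Nat) : Nat → List Int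
  | 0 => pvRow1 m kN
  | n+1 => pvStep m kN (n+2) (pvDP m kN n)

def solve_sorted_machines_problem_py_alt (machines : List Int) (k : Int) (end_ : Int) : Int :=
  if end_ = 1 then ((PySem.List.pyGet? machines 0).getD 0) * k
  else pvInner (pvDP machines k.toNat (end_.toNat - 2))
         ((PySem.List.pyGet? machines (end_ - 1)).getD 0) k.toNat

-- ===== PRECONDITION & SPEC =====
-- A asserts end > 0 and k > 0 and (for k >= 2) raises IndexError when end > len(machines);
-- Pre_ also excludes end > len(machines) with k = 1, where A accidentally returns machines[0]
-- because its else branch is never reached, while B's DP indexes machines[end-1] and raises.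
def Pre_solve_sorted_machines_problem_py (machines : List Int) (k : Int) (end_ : Int) : Prop :=
  0 < k ∧ 0 < end_ ∧ end_ ≤ machines.length

instance (machines : List Int) (k : Int) (end_ : Int) : Decidable (Pre_solve_sorted_machines_problem_py machines k end_) := by unfold Pre_solve_sorted_machines_problem_py; infer_instance

def pvWitness_solve_sorted_machines_problem_py : List Int × Int × Int := ([3, 5], 2, 2)

def Spec_solve_sorted_machines_problem_py (machines : List Int) (k : Int) (end_ : Int) (out : Int) : Prop := out = solve_sorted_machines_problem_py_alt machines k end_
instance (machines : List Int) (k : Int) (end_ : Int) (out : Int) : Decidable (Spec_solve_sorted_machines_problem_py machines k end_ out) := by unfold Spec_solve_sorted_machines_problem_py; infer_instance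

-- ===== CLAIM (what is proved, stated in full; the proofs are below) =====
def Claim_equal_solve_sorted_machines_problem_py : Prop := ∀ (machines : List Int) (k : Int) (end_ : Int), Dom_solve_sorted_machines_problem_py machines k end_ → Pre_solve_sorted_machines_problem_py machines k end_ → Spec_solve_sorted_machines_problem_py machines k end_ (solve_sorted_machines_problem_py machines k end_)

-- ===== LEMMAS AND PROOFS =====

-- an Option-accumulator foldl that is already `some` collapses to a plain foldl
theorem pv_foldl_some {α : Type} (sol : α → Int) (F : Int → α → Int) (l : List α) (b : Int) :
    l.foldl (fun (best : Option Int) a => match best with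
      | none => some (sol a) | some x => some (F x a)) (some b) = some (l.foldl F b) := by
  induction l generalizing b with
  | nil => rfl
  | cons a t ih => simp [List.foldl_cons, ih]

theorem pv_minmax (v c b : Int) :
    (if (if v ≥ c then v else c) < b then (if v ≥ c then v else c) else b) = min b (max v c) := by
  rw [min_def, max_def]; split_ifs <;> omega

-- one application of Source B's _best computes A's value one level up
theorem pv_inner_spec (m : List Int) (n : Nat) (dp : List Int) (kk : Nat) (hpos : 0 < kk)
    (ih : ∀ j : Nat, j ≤ kk → dp.getD j 0 = pvAgo m (j : Int) (n+1)) :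
    pvInner dp ((PySem.List.pyGet? m ((n : Int) + 1)).getD 0) kk = pvAgo m (kk : Int) (n+2) := by
  set mv := ((PySem.List.pyGet? m ((n : Int) + 1)).getD 0) with hmv
  -- rewrite A's pyRange into 0 :: map (+1) (range (kk-1))
  have hrange : PySem.List.pyRange 0 (kk : Int) 1
      = (0 : Int) :: (List.range (kk-1)).map (fun (t : Nat) => ((t : Int) + 1)) := by
    rw [PySem.List.pyRange_one]
    have h1 : (((kk : Int)) - 0).toNat = kk := by omega
    rw [h1]
    obtain ⟨j, rfl⟩ : ∃ j, kk = j + 1 := ⟨kk - 1, by omega⟩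
    rw [List.range_succ_eq_map, List.map_cons, List.map_map]
    simp only [Nat.add_sub_cancel]
    congr 1
    refine List.map_congr_left ?_
    intro t _
    simp only [Function.comp_apply]
    push_cast
    ring
  have hA : pvAgo m (kk : Int) (n+2)
      = ((List.range (kk-1)).map (fun (t : Nat) => ((t : Int) + 1))).foldl
          (fun x s => min x (max (pvAgo m ((kk : Int) - s) (n+1)) (mv * s)))
          (pvAgo m (kk : Int) (n+1)) := by
    show ((PySem.List.pyRange 0 (kk : Int) 1).foldl _ none).getD 0 = _
    rw [hrange]
    rw [List.foldl_cons]
    have hz : ((kk : Int) - 0) = (kk : Int) := by ring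
    simp only [hz]
    rw [pv_foldl_some (fun s => pvAgo m ((kk : Int) - s) (n+1))
      (fun x s => min x (max (pvAgo m ((kk : Int) - s) (n+1)) (mv * s)))]
    rfl
  rw [hA, List.foldl_map]
  unfold pvInner
  rw [ih kk le_rfl]
  refine PySem.List.foldl_congr_mem _ _ _ _ ?_
  intro acc i hi
  have hi' : i < kk - 1 := List.mem_range.mp hi
  have hle : kk - (i+1) ≤ kk := by omega
  have hcast : ((kk - (i+1) : Nat) : Int) = (kk : Int) - ((i : Int) + 1) := by omega
  simp only [ih (kk - (i+1)) hle, hcast, pv_minmax]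

-- the DP row n holds A's values for end = n+1, at every budget kk ≤ kN
theorem pv_dp_spec (m : List Int) (kN : Nat) (n : Nat) :
    ∀ kk : Nat, kk ≤ kN → (pvDP m kN n).getD kk 0 = pvAgo m (kk : Int) (n+1) := by
  induction n with
  | zero =>
    intro kk hkk
    have h : (pvRow1 m kN).getD kk 0 = ((PySem.List.pyGet? m 0).getD 0) * (kk : Int) := by
      unfold pvRow1
      rw [List.getD_eq_getElem?_getD, List.getElem?_map,
        List.getElem?_range (by omega : kk < kN+1)]
      rfl
    simpa [pvDP, pvAgo] using h
  | succ n ih =>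
    intro kk hkk
    have hrow : (pvDP m kN (n+1)).getD kk 0
        = if kk = 0 then 0
          else pvInner (pvDP m kN n) ((PySem.List.pyGet? m ((n : Int) + 1)).getD 0) kk := by
      have : ((n : Nat) + 2 : Int) - 1 = (n : Int) + 1 := by ring
      simp [pvDP, pvStep, this, List.getD_eq_getElem?_getD, Nat.lt_succ_of_le hkk]
    rw [hrow]
    rcases Nat.eq_zero_or_pos kk with h0 | hpos
    · subst h0
      simp [pvAgo, PySem.List.pyRange_one_eq_nil (by omega : (0:Int) ≤ 0)]
    · rw [if_neg (by omega : ¬ kk = 0)]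
      exact pv_inner_spec m n (pvDP m kN n) kk hpos
        (fun j hj => ih j (le_trans hj hkk))

-- ===== VERDICT (by name: the statement is the Claim_ definition above) =====
theorem solve_sorted_machines_problem_py_spec : Claim_equal_solve_sorted_machines_problem_py := by
  intro machines k end_ _hdom hpre
  obtain ⟨hk, he, _⟩ := hpre
  unfold Spec_solve_sorted_machines_problem_py
  unfold solve_sorted_machines_problem_py solve_sorted_machines_problem_py_alt
  by_cases hend : end_ = 1
  · subst hend
    simp [pvAgo]
  · rw [if_neg hend]
    have h2 : 2 ≤ end_ := by omega
    have hkcast : ((k.toNat : Nat) : Int) = k := Int.toNat_of_nonneg (by omega)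
    have hidx : end_ - 1 = ((end_.toNat - 2 : Nat) : Int) + 1 := by omega
    rw [hidx, pv_inner_spec machines (end_.toNat - 2) _ k.toNat (by omega)
      (fun j hj => pv_dp_spec machines k.toNat (end_.toNat - 2) j hj)]
    have h3 : (end_.toNat - 2) + 2 = end_.toNat := by omega
    rw [h3, hkcast]
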